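-- pv_equiv track=rewrite | github.com/MrBrantCode/unitest_baseline | mut_generate/mist_train_cf/cf_58343/solution.py | find_maximum_sum
-- ===== SOURCE A (Python) =====
-- def gcd(a, b):
--     """Calculate the greatest common divisor of two numbers"""
--     if a == 0:
--         return b
--     return gcd(b % a, a)
--
-- def pairwise_coprime(arr, start, end):
--     """Check if all pairs of elements in subarray don't share a divisor > 1"""
--     for i in range(start, end):
--         for j in range(i + 1, end):
--             if gcd(arr[i], arr[j]) > 1:
--                 return False
--     return True
--
-- def no_adjacent_elements(prev_index, curr_index):
--     """Check for no adjacent elements"""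
--     return abs(prev_index - curr_index) > 1
--
-- def find_maximum_sum(arr):
--     """Calculate the maximum sum of a subarray with conditions"""
--     dp = [0] * len(arr)
--     dp[0] = arr[0]
--     for i in range(1, len(arr)):
--         dp[i] = arr[i]
--         for j in range(i - 1):
--             if no_adjacent_elements(j, i) and pairwise_coprime(arr, j, i + 1):
--                 dp[i] = max(dp[i], dp[j] + arr[i])
--         dp[i] = max(dp[i], dp[i-1])
--     return dp[-1]
-- ===== SOURCE B (Python) =====
-- def find_maximum_sum(arr):
--     """Calculate the maximum sum of a subarray with conditions"""
--     prev2, prev = 0, arr[0]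
--     for i in range(1, len(arr)):
--         cand = arr[i]
--         if i >= 2 and _window_ok(arr[i - 2], arr[i - 1], arr[i]):
--             cand = max(cand, prev2 + arr[i])
--         prev2, prev = prev, max(prev, cand)
--     return prev
--
-- def _gcd(a, b):
--     while a:
--         a, b = b % a, a
--     return b
--
-- def _window_ok(x, y, z):
--     return _gcd(x, y) <= 1 and _gcd(x, z) <= 1 and _gcd(y, z) <= 1
-- ===== Notes on version B (the rewrite author's own statement) =====
-- stated objective: faster
-- what changed: A rescans every split point j and re-verifies the whole window [j..i] pairwise-coprime with a nested O(n^2 log) pass; B exploits that the valid-j set is upward closed and dp is nondecreasing, so only j = i-2 matters, and keeps just (dp[i-2], dp[i-1]) while checking a single 3-element window per step.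
import Mathlib
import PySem

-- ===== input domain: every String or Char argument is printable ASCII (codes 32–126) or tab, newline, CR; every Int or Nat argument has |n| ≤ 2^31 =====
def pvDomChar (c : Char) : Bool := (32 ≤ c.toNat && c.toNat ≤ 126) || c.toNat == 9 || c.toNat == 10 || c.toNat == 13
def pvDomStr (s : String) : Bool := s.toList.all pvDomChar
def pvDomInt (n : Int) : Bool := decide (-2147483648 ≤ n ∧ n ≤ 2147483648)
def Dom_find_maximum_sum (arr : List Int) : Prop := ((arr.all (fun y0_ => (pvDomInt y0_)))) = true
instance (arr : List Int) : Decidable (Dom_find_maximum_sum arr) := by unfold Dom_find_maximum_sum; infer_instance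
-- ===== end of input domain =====

-- B replaces A's scan over all earlier split points j (each rechecked by an O(n^2) pairwise-coprime
-- pass) with an O(1)-per-step recurrence: since the valid-j set is upward closed and dp is
-- nondecreasing, only j = i-2 matters, so B checks a single 3-element window. Objective: faster.

-- ===== PORT A =====
-- A's recursive Euclid (Python '%': PySem.Int.mod).
def gcdA (a b : Int) : Int :=
  if a = 0 then b else gcdA (PySem.Int.mod b a) a
termination_by a.natAbs
decreasing_by
  rename_i h
  rcases lt_trichotomy a 0 with ha | ha | ha
  · have := PySem.Int.mod_neg_bounds b ha; omega
  · exact absurd ha h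
  · have h1 := PySem.Int.mod_nonneg b ha
    have h2 := PySem.Int.mod_lt b ha
    omega

-- A indexes arr[i] with indices that are always in range in A's calls; pyGetD is exact there.
def pairwise_coprime (arr : List Int) (start stop : Int) : Bool :=
  (PySem.List.pyRange start stop 1).all fun i =>
    (PySem.List.pyRange (i + 1) stop 1).all fun j =>
      !(decide (1 < gcdA (PySem.List.pyGetD arr i 0) (PySem.List.pyGetD arr j 0)))

def no_adjacent_elements (prev_index curr_index : Int) : Bool :=
  decide (1 < |prev_index - curr_index|)

-- body of A's outer loop: dp[i] = arr[i]; for j in range(i-1): …; dp[i] = max(dp[i], dp[i-1])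
def astep (arr : List Int) (dp : List Int) (i : Int) : List Int :=
  let ai := PySem.List.pyGetD arr i 0
  let v := (PySem.List.pyRange 0 (i - 1) 1).foldl
    (fun v j =>
      if no_adjacent_elements j i && pairwise_coprime arr j (i + 1) then
        max v (PySem.List.pyGetD dp j 0 + ai)
      else v) ai
  dp ++ [max v (PySem.List.pyGetD dp (i - 1) 0)]

def find_maximum_sum (arr : List Int) : Int :=
  let dp := (PySem.List.pyRange 1 (arr.length : Int) 1).foldl (astep arr)
    [PySem.List.pyGetD arr 0 0]
  PySem.List.pyGetD dp (-1) 0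

-- ===== PORT B =====
-- B's iterative Euclid (while a: a, b = b % a, a).
def gcdB (a b : Int) : Int :=
  if a = 0 then b else gcdB (PySem.Int.mod b a) a
termination_by a.natAbs
decreasing_by
  rename_i h
  rcases lt_trichotomy a 0 with ha | ha | ha
  · have := PySem.Int.mod_neg_bounds b ha; omega
  · exact absurd ha h
  · have h1 := PySem.Int.mod_nonneg b ha
    have h2 := PySem.Int.mod_lt b ha
    omega

def window_ok (x y z : Int) : Bool :=
  gcdB x y ≤ 1 && gcdB x z ≤ 1 && gcdB y z ≤ 1

-- body of B's loop over i: state = (prev2, prev) = (dp[i-2], dp[i-1])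
def bstep (arr : List Int) (s : Int × Int) (i : Int) : Int × Int :=
  let ai := PySem.List.pyGetD arr i 0
  let cand :=
    if 2 ≤ i ∧ window_ok (PySem.List.pyGetD arr (i - 2) 0) (PySem.List.pyGetD arr (i - 1) 0) ai then
      max ai (s.1 + ai)
    else ai
  (s.2, max s.2 cand)

def find_maximum_sum_alt (arr : List Int) : Int :=
  ((PySem.List.pyRange 1 (arr.length : Int) 1).foldl (bstep arr)
    (0, PySem.List.pyGetD arr 0 0)).2

-- ===== PRECONDITION & SPEC =====
-- A raises IndexError (dp[0] = arr[0]) on the empty list; so does B.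
def Pre_find_maximum_sum (arr : List Int) : Prop := arr ≠ []
instance (arr : List Int) : Decidable (Pre_find_maximum_sum arr) := by
  unfold Pre_find_maximum_sum; infer_instance
def pvWitness_find_maximum_sum : List Int := [2, 5, 9, 4]

def Spec_find_maximum_sum (arr : List Int) (out : Int) : Prop := out = find_maximum_sum_alt arr
instance (arr : List Int) (out : Int) : Decidable (Spec_find_maximum_sum arr out) := by
  unfold Spec_find_maximum_sum; infer_instance

-- ===== CLAIM (what is proved, stated in full; the proofs are below) =====
def Claim_equal_find_maximum_sum : Prop := ∀ (arr : List Int), Dom_find_maximum_sum arr → Pre_find_maximum_sum arr → Spec_find_maximum_sum arr (find_maximum_sum arr)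

-- ===== LEMMAS AND PROOFS =====

theorem gcdB_eq_gcdA (a b : Int) : gcdB a b = gcdA a b := by
  fun_induction gcdB a b with
  | _ => rw [gcdA]; simp_all

-- generic facts about the conditional-max fold shape of A's inner loop
theorem fmax_ge_init (c : Int → Bool) (w : Int → Int) (l : List Int) (v0 : Int) :
    v0 ≤ l.foldl (fun v j => if c j then max v (w j) else v) v0 := by
  induction l generalizing v0 with
  | nil => simp
  | cons x xs ih =>
    refine le_trans ?_ (ih _)
    dsimp only [List.foldl]
    split <;> simp

theorem fmax_ge_elem (c : Int → Bool) (w : Int → Int) (l : List Int) (v0 j : Int)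
    (hj : j ∈ l) (hc : c j = true) :
    w j ≤ l.foldl (fun v j => if c j then max v (w j) else v) v0 := by
  induction l generalizing v0 with
  | nil => simp at hj
  | cons x xs ih =>
    rcases List.mem_cons.mp hj with h | h
    · subst h
      refine le_trans ?_ (fmax_ge_init c w xs _)
      simp [hc]
    · exact ih _ h

theorem fmax_le (c : Int → Bool) (w : Int → Int) (l : List Int) (v0 M : Int)
    (h0 : v0 ≤ M) (h : ∀ j ∈ l, c j = true → w j ≤ M) :
    l.foldl (fun v j => if c j then max v (w j) else v) v0 ≤ M := by
  induction l generalizing v0 with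
  | nil => simpa
  | cons x xs ih =>
    dsimp only [List.foldl]
    refine ih _ ?_ (fun j hj hc => h j (List.mem_cons_of_mem _ hj) hc)
    split
    · exact max_le h0 (h x List.mem_cons_self (by assumption))
    · exact h0

theorem fmax_id (c : Int → Bool) (w : Int → Int) (l : List Int) (v0 : Int)
    (h : ∀ j ∈ l, c j = false) :
    l.foldl (fun v j => if c j then max v (w j) else v) v0 = v0 := by
  induction l generalizing v0 with
  | nil => rfl
  | cons x xs ih =>
    dsimp only [List.foldl]
    rw [h x List.mem_cons_self]
    exact ih _ (fun j hj => h j (List.mem_cons_of_mem _ hj))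

-- characterization of A's pairwise_coprime as a ∀ over index pairs
theorem pc_iff (arr : List Int) (s e : Int) :
    pairwise_coprime arr s e = true ↔
      ∀ i j : Int, s ≤ i → i < j → j < e →
        gcdA (PySem.List.pyGetD arr i 0) (PySem.List.pyGetD arr j 0) ≤ 1 := by
  simp only [pairwise_coprime, List.all_eq_true, PySem.List.mem_pyRange_one,
    Bool.not_eq_true', decide_eq_false_iff_not, not_lt]
  constructor
  · rintro h i j h1 h2 h3
    exact h i ⟨h1, by omega⟩ j ⟨by omega, h3⟩
  · rintro h i ⟨h1, h2⟩ j ⟨h3, h4⟩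
    exact h i j h1 (by omega) h4

theorem pc_mono (arr : List Int) (s s' e : Int) (hs : s ≤ s')
    (h : pairwise_coprime arr s e = true) : pairwise_coprime arr s' e = true := by
  rw [pc_iff] at h ⊢
  exact fun i j h1 h2 h3 => h i j (le_trans hs h1) h2 h3

-- the 3-element window A checks at j = i-2 is exactly B's window_ok test
theorem pc_three (arr : List Int) (i : Int) (h2 : 2 ≤ i) :
    pairwise_coprime arr (i - 2) (i + 1) =
      window_ok (PySem.List.pyGetD arr (i - 2) 0) (PySem.List.pyGetD arr (i - 1) 0)
        (PySem.List.pyGetD arr i 0) := by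
  rw [Bool.eq_iff_iff, pc_iff]
  have hw : window_ok (PySem.List.pyGetD arr (i - 2) 0) (PySem.List.pyGetD arr (i - 1) 0)
      (PySem.List.pyGetD arr i 0) = true ↔
      (gcdA (PySem.List.pyGetD arr (i - 2) 0) (PySem.List.pyGetD arr (i - 1) 0) ≤ 1 ∧
       gcdA (PySem.List.pyGetD arr (i - 2) 0) (PySem.List.pyGetD arr i 0) ≤ 1 ∧
       gcdA (PySem.List.pyGetD arr (i - 1) 0) (PySem.List.pyGetD arr i 0) ≤ 1) := by
    simp [window_ok, gcdB_eq_gcdA, and_assoc]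
  rw [hw]
  constructor
  · intro h
    exact ⟨h _ _ le_rfl (by omega) (by omega), h _ _ le_rfl (by omega) (by omega),
      h _ _ (by omega) (by omega) (by omega)⟩
  · rintro ⟨hxy, hxz, hyz⟩ a b h1 h3 h4
    have : (a = i - 2 ∧ (b = i - 1 ∨ b = i)) ∨ (a = i - 1 ∧ b = i) := by omega
    rcases this with ⟨ha, hb | hb⟩ | ⟨ha, hb⟩ <;> subst ha <;> subst hb <;> assumption

-- the states of the two folds, as functions of the number of processed indices
def Adp (arr : List Int) (m : Nat) : List Int :=
  (PySem.List.pyRange 1 (m : Int) 1).foldl (astep arr) [PySem.List.pyGetD arr 0 0]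

def Bst (arr : List Int) (m : Nat) : Int × Int :=
  (PySem.List.pyRange 1 (m : Int) 1).foldl (bstep arr) (0, PySem.List.pyGetD arr 0 0)

theorem pyGetD_toNat (dp : List Int) (j : Int) (h0 : 0 ≤ j) (h1 : j < (dp.length : Int)) :
    PySem.List.pyGetD dp j 0 = dp.getD j.toNat 0 := by
  rw [PySem.List.pyGetD_eq_getElem dp 0 h0 h1]
  exact (List.getD_eq_getElem dp 0 (by omega)).symm

-- B's candidate value at step i, written as a function of the state
def bcand (arr : List Int) (s : Int × Int) (i : Int) : Int :=
  if 2 ≤ i ∧ window_ok (PySem.List.pyGetD arr (i - 2) 0) (PySem.List.pyGetD arr (i - 1) 0)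
      (PySem.List.pyGetD arr i 0) then
    max (PySem.List.pyGetD arr i 0) (s.1 + PySem.List.pyGetD arr i 0)
  else PySem.List.pyGetD arr i 0

theorem bstep_eq_bcand (arr : List Int) (s : Int × Int) (i : Int) :
    bstep arr s i = (s.2, max s.2 (bcand arr s i)) := rfl

-- A's inner loop over j computes B's single-window candidate
theorem v_char (arr dp : List Int) (m : Nat) (hm : 1 ≤ m) (hlen : dp.length = m)
    (hmono : ∀ j k : Nat, j ≤ k → k < m → dp.getD j 0 ≤ dp.getD k 0) :
    (PySem.List.pyRange 0 ((m : Int) - 1) 1).foldl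
      (fun v j => if no_adjacent_elements j (m : Int) &&
          pairwise_coprime arr j ((m : Int) + 1) then
        max v (PySem.List.pyGetD dp j 0 + PySem.List.pyGetD arr (m : Int) 0) else v)
      (PySem.List.pyGetD arr (m : Int) 0) =
    (if 2 ≤ (m : Int) ∧ window_ok (PySem.List.pyGetD arr ((m : Int) - 2) 0)
        (PySem.List.pyGetD arr ((m : Int) - 1) 0) (PySem.List.pyGetD arr (m : Int) 0) then
      max (PySem.List.pyGetD arr (m : Int) 0)
        (dp.getD (m - 2) 0 + PySem.List.pyGetD arr (m : Int) 0)
    else PySem.List.pyGetD arr (m : Int) 0) := by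
  set ai := PySem.List.pyGetD arr (m : Int) 0 with hai
  set c : Int → Bool := fun j => no_adjacent_elements j (m : Int) &&
    pairwise_coprime arr j ((m : Int) + 1) with hc
  set w : Int → Int := fun j => PySem.List.pyGetD dp j 0 + ai with hw
  rcases Nat.lt_or_ge m 2 with hm2 | hm2
  · have hm1 : m = 1 := by omega
    subst hm1
    rw [PySem.List.pyRange_one_eq_nil (by norm_num), if_neg (by norm_num)]
    rfl
  · have hm2' : (2 : Int) ≤ (m : Int) := by exact_mod_cast hm2
    by_cases hW : pairwise_coprime arr ((m : Int) - 2) ((m : Int) + 1) = true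
    · have hwin : window_ok (PySem.List.pyGetD arr ((m : Int) - 2) 0)
          (PySem.List.pyGetD arr ((m : Int) - 1) 0) ai = true := by
        rw [← pc_three arr (m : Int) hm2']; exact hW
      rw [if_pos ⟨hm2', hwin⟩]
      apply le_antisymm
      · apply fmax_le c w _ ai
        · exact le_max_left _ _
        · intro j hj hcj
          rw [PySem.List.mem_pyRange_one] at hj
          show PySem.List.pyGetD dp j 0 + ai ≤ _
          rw [pyGetD_toNat dp j hj.1 (by omega)]
          have hmm := hmono j.toNat (m - 2) (by omega) (by omega)
          exact le_trans (by linarith) (le_max_right (PySem.List.pyGetD arr (m : Int) 0)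
            (dp.getD (m - 2) 0 + ai))
      · apply max_le
        · exact fmax_ge_init c w _ ai
        · have hmem : ((m : Int) - 2) ∈ PySem.List.pyRange 0 ((m : Int) - 1) := by
            rw [PySem.List.mem_pyRange_one]; omega
          have hcond : c ((m : Int) - 2) = true := by
            rw [hc]
            dsimp only
            rw [Bool.and_eq_true]
            refine ⟨?_, hW⟩
            unfold no_adjacent_elements
            simp only [decide_eq_true_eq]
            have h2 : (m : Int) - 2 - m = -2 := by ring
            rw [h2]; norm_num
          have hge := fmax_ge_elem c w (PySem.List.pyRange 0 ((m : Int) - 1)) ai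
            ((m : Int) - 2) hmem hcond
          have hwv : w ((m : Int) - 2) = dp.getD (m - 2) 0 + ai := by
            rw [hw]
            dsimp only
            rw [pyGetD_toNat dp _ (by omega) (by omega)]
            congr 2
            omega
          rw [hwv] at hge
          exact hge
    · have hW' : pairwise_coprime arr ((m : Int) - 2) ((m : Int) + 1) = false := by
        simpa using hW
      have hwin : window_ok (PySem.List.pyGetD arr ((m : Int) - 2) 0)
          (PySem.List.pyGetD arr ((m : Int) - 1) 0) ai = false := by
        rw [← pc_three arr (m : Int) hm2']; exact hW'
      rw [if_neg (by simp [hwin])]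
      apply fmax_id c w _ ai
      intro j hj
      rw [PySem.List.mem_pyRange_one] at hj
      have hpc : pairwise_coprime arr j ((m : Int) + 1) = false := by
        cases h : pairwise_coprime arr j ((m : Int) + 1)
        · rfl
        · exact absurd (pc_mono arr j ((m : Int) - 2) _ (by omega) h)
            (by rw [hW']; simp)
      rw [hc]
      dsimp only
      rw [hpc, Bool.and_false]

-- invariant: dp has length m, is nondecreasing, and B's state is (dp[m-2], dp[m-1])
theorem main_inv (arr : List Int) (m : Nat) (hm : 1 ≤ m) :
    (Adp arr m).length = m ∧
    (∀ j k : Nat, j ≤ k → k < m → (Adp arr m).getD j 0 ≤ (Adp arr m).getD k 0) ∧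
    (Bst arr m).2 = (Adp arr m).getD (m - 1) 0 ∧
    (Bst arr m).1 = (if 2 ≤ m then (Adp arr m).getD (m - 2) 0 else 0) := by
  induction m, hm using Nat.le_induction with
  | base =>
    have h0 : PySem.List.pyRange 1 ((1 : Nat) : Int) 1 = [] :=
      PySem.List.pyRange_one_eq_nil (by norm_num)
    unfold Adp Bst
    rw [h0]
    refine ⟨rfl, ?_, rfl, rfl⟩
    intro j k hjk hk
    interval_cases k
    interval_cases j
    exact le_rfl
  | succ m hm ih =>
    obtain ⟨hlen, hmono, hsnd, hfst⟩ := ih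
    set dp := Adp arr m with hdp
    have hcast : ((m + 1 : Nat) : Int) = (m : Int) + 1 := by push_cast; ring
    have hsplit : PySem.List.pyRange 1 ((m + 1 : Nat) : Int) 1 =
        PySem.List.pyRange 1 (m : Int) 1 ++ [(m : Int)] := by
      rw [hcast]; exact PySem.List.pyRange_one_succ_right (by exact_mod_cast hm)
    have hA : Adp arr (m + 1) = astep arr dp (m : Int) := by
      unfold Adp; rw [hsplit, List.foldl_append]; rfl
    have hB : Bst arr (m + 1) = bstep arr (Bst arr m) (m : Int) := by
      unfold Bst; rw [hsplit, List.foldl_append]; rfl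
    -- the value A appends and the value B computes
    have hlast : PySem.List.pyGetD dp ((m : Int) - 1) 0 = dp.getD (m - 1) 0 := by
      rw [pyGetD_toNat dp _ (by omega) (by omega)]
      congr 1; omega
    have hv := v_char arr dp m hm hlen hmono
    have hcand : (PySem.List.pyRange 0 ((m : Int) - 1) 1).foldl
        (fun v j => if no_adjacent_elements j (m : Int) &&
            pairwise_coprime arr j ((m : Int) + 1) then
          max v (PySem.List.pyGetD dp j 0 + PySem.List.pyGetD arr (m : Int) 0) else v)
        (PySem.List.pyGetD arr (m : Int) 0) = bcand arr (Bst arr m) (m : Int) := by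
      rw [hv]
      unfold bcand
      split
      · rename_i hcond
        rw [hfst, if_pos (by exact_mod_cast hcond.1)]
      · rfl
    have hAeq : Adp arr (m + 1) = dp ++ [max (bcand arr (Bst arr m) (m : Int)) (dp.getD (m - 1) 0)] := by
      rw [hA]; unfold astep
      dsimp only
      rw [hcand, hlast]
    have hBeq : Bst arr (m + 1) = (dp.getD (m - 1) 0, max (dp.getD (m - 1) 0) (bcand arr (Bst arr m) (m : Int))) := by
      rw [hB, bstep_eq_bcand, hsnd]
    set x := max (bcand arr (Bst arr m) (m : Int)) (dp.getD (m - 1) 0) with hx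
    have hTop : (dp ++ [x]).getD m 0 = x := by
      rw [List.getD_append_right _ _ _ _ (by omega)]
      simp [hlen]
    have hLow : ∀ j : Nat, j < m → (dp ++ [x]).getD j 0 = dp.getD j 0 := by
      intro j hj
      exact List.getD_append _ _ _ _ (by omega)
    refine ⟨?_, ?_, ?_, ?_⟩
    · rw [hAeq]; simp [hlen]
    · intro j k hjk hk
      rw [hAeq]
      rcases Nat.lt_or_ge k m with hkm | hkm
      · rw [hLow j (by omega), hLow k hkm]
        exact hmono j k hjk hkm
      · have hk' : k = m := by omega
        rw [hk', hTop]
        rcases Nat.lt_or_ge j m with hjm | hjm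
        · rw [hLow j hjm]
          exact le_trans (hmono j (m - 1) (by omega) (by omega)) (le_max_right _ _)
        · have hj' : j = m := by omega
          rw [hj', hTop]
    · rw [hAeq, hBeq]
      have : m + 1 - 1 = m := by omega
      rw [this, hTop, hx, max_comm]
    · rw [hAeq, hBeq, if_pos (by omega)]
      have : m + 1 - 2 = m - 1 := by omega
      rw [this, hLow (m - 1) (by omega)]

theorem find_maximum_sum_spec : Claim_equal_find_maximum_sum := by
  intro arr _ hPre
  unfold Spec_find_maximum_sum
  have hn : 1 ≤ arr.length := List.length_pos_of_ne_nil hPre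
  obtain ⟨hlen, hmono, hsnd, hfst⟩ := main_inv arr arr.length hn
  have hdp : find_maximum_sum arr = PySem.List.pyGetD (Adp arr arr.length) (-1) 0 := rfl
  have halt : find_maximum_sum_alt arr = (Bst arr arr.length).2 := rfl
  rw [hdp, halt, hsnd]
  have hne : Adp arr arr.length ≠ [] := by
    intro h; rw [h] at hlen; simp at hlen; omega
  rw [PySem.List.pyGetD_neg_one _ _ hne, List.getLast_eq_getElem]
  rw [List.getD_eq_getElem _ _ (by omega)]
  simp [hlen]
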